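-- pv_equiv track=rewrite | github.com/kolte200/windows-disk-cleaner | main.py | path_part_to_re
-- ===== SOURCE A (Python) =====
-- def path_part_to_re_escape(c: str) -> str:
--     if c in ['.', '{', '}', '[', ']', '/', '\\', '|', '(', ')', '$', '^', '?', '*']:
--         return "\\" + c
--     return c
--
-- def path_part_to_re(part: str) -> tuple[str,list[str]]:
--     resolveds = [""]
--     new_resolveds = []
--     regex = ""
--     ctx = 0
--     chrs = ""
--     for c in part:
--         if ctx == 0:
--             if c == '*':
--                 regex += "[^\\/\\\\]*"
--                 resolveds = []
--             elif c == '[':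
--                 ctx = 1
--                 chrs = ""
--                 new_resolveds = []
--             else:
--                 regex += path_part_to_re_escape(c)
--                 for i in range(len(resolveds)):
--                     resolveds[i] += c
--         elif ctx == 1:
--             if c == ']':
--                 ctx = 0
--                 regex += "[%s]" % chrs
--                 resolveds = new_resolveds
--             else:
--                 chrs += path_part_to_re_escape(c)
--                 for i in range(len(resolveds)):
--                     new_resolveds.append(resolveds[i] + c)
--     return regex, resolveds
-- ===== SOURCE B (Python) =====
-- def _esc(c):
--     return "\\" + c if c in '.{}[]/\\|()$^?*' else c
--
-- def path_part_to_re(part: str) -> tuple[str, list[str]]: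
--     # tokenize: single chars, '*', bracket groups; unterminated '[' drops the rest
--     toks = []
--     i, n = 0, len(part)
--     while i < n:
--         c = part[i]
--         if c == '[':
--             j = part.find(']', i + 1)
--             if j < 0:
--                 break
--             toks.append(('g', part[i + 1:j]))
--             i = j + 1
--         elif c == '*':
--             toks.append(('*', ''))
--             i += 1
--         else:
--             toks.append(('c', c))
--             i += 1
--     regex_parts = []
--     resolveds = ['']
--     for kind, s in toks:
--         if kind == '*':
--             regex_parts.append('[^\\/\\\\]*')
--             resolveds = []
--         elif kind == 'g':
--             regex_parts.append('[' + ''.join(map(_esc, s)) + ']')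
--             resolveds = [r + c for c in s for r in resolveds]
--         else:
--             regex_parts.append(_esc(s))
--             resolveds = [r + s for r in resolveds]
--     return ''.join(regex_parts), resolveds
-- ===== Notes on version B (the rewrite author's own statement) =====
-- stated objective: simpler
-- what changed: Replaces A's two-state character machine with mutable ctx/chrs/new_resolveds state by a two-phase decomposition: tokenize the pattern once into literal/star/group tokens (finding each group's closing ']' with str.find and slicing), then map tokens to regex pieces and fold them over the resolved strings.
import Mathlib
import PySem

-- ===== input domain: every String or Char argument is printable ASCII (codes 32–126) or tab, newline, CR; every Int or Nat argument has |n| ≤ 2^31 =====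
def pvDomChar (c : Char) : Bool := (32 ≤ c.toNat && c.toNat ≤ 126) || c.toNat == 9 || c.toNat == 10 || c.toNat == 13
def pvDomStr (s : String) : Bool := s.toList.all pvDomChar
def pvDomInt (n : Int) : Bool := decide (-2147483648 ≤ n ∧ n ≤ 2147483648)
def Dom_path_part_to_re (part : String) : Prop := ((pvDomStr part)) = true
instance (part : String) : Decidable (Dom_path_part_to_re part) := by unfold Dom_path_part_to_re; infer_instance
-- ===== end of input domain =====

-- B replaces A's two-state character machine by a tokenize-then-fold decomposition (simpler); return values are identical.

-- ===== PORT A =====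
def ppEscA (c : Char) : String :=
  if c ∈ ['.', '{', '}', '[', ']', '/', '\\', '|', '(', ')', '$', '^', '?', '*'] then
    "\\".push c
  else
    String.singleton c

def ppLoopA : List Char → List String → List String → String → Int → String → String × List String
  | [], res, _, regex, _, _ => (regex, res)
  | c :: cs, res, newRes, regex, ctx, chrs =>
    if ctx == 0 then
      if c == '*' then ppLoopA cs [] newRes (regex ++ "[^\\/\\\\]*") 0 chrs
      else if c == '[' then ppLoopA cs res [] regex 1 ""
      else ppLoopA cs (res.map (·.push c)) newRes (regex ++ ppEscA c) 0 chrs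
    else
      if c == ']' then ppLoopA cs newRes newRes (regex ++ "[" ++ chrs ++ "]") 0 chrs
      else ppLoopA cs res (newRes ++ res.map (·.push c)) regex 1 (chrs ++ ppEscA c)

def path_part_to_re (part : String) : String × List String :=
  ppLoopA part.toList [""] [] "" 0 ""

-- ===== PORT B =====
def ppEscB (c : Char) : String :=
  if c ∈ ".{}[]/\\|()$^?*".toList then "\\".push c else String.singleton c

inductive PTok where
  | lit : Char → PTok
  | star : PTok
  | group : List Char → PTok
  deriving DecidableEq, Repr

-- part.find(']', i+1) + slicing, rendered as takeWhile/dropWhile at the first ']'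
def ppTokenize : List Char → List PTok
  | [] => []
  | c :: cs =>
    if c == '[' then
      match h : cs.dropWhile (· ≠ ']') with
      | [] => []
      | _ :: rest => PTok.group (cs.takeWhile (· ≠ ']')) :: ppTokenize rest
    else if c == '*' then PTok.star :: ppTokenize cs
    else PTok.lit c :: ppTokenize cs
termination_by cs => cs.length
decreasing_by
  · have h1 : (cs.dropWhile (· ≠ ']')).length ≤ cs.length := cs.length_dropWhile_le _
    rw [h] at h1
    simp at h1 ⊢
    omega
  · simp
  · simp

def ppJoin (l : List String) : String := l.foldl (· ++ ·) ""

def ppTokRegex : PTok → String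
  | .lit c => ppEscB c
  | .star => "[^\\/\\\\]*"
  | .group cs => "[" ++ ppJoin (cs.map ppEscB) ++ "]"

def ppTokRes (res : List String) : PTok → List String
  | .lit c => res.map (·.push c)
  | .star => []
  | .group cs => cs.flatMap (fun c => res.map (·.push c))

def path_part_to_re_alt (part : String) : String × List String :=
  let toks := ppTokenize part.toList
  (ppJoin (toks.map ppTokRegex), toks.foldl ppTokRes [""])

-- ===== PRECONDITION & SPEC =====
def Spec_path_part_to_re (part : String) (out : String × List String) : Prop := out = path_part_to_re_alt part
instance (part : String) (out : String × List String) : Decidable (Spec_path_part_to_re part out) := by unfold Spec_path_part_to_re; infer_instance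

-- ===== CLAIM (what is proved, stated in full; the proofs are below) =====
def Claim_equal_path_part_to_re : Prop := ∀ (part : String), Dom_path_part_to_re part → Spec_path_part_to_re part (path_part_to_re part)

-- ===== LEMMAS AND PROOFS =====

theorem ppEsc_eq (c : Char) : ppEscB c = ppEscA c := by
  simp only [ppEscA, ppEscB,
    show (".{}[]/\\|()$^?*").toList
       = ['.', '{', '}', '[', ']', '/', '\\', '|', '(', ')', '$', '^', '?', '*'] from by decide]

theorem ppMapEsc_eq (l : List Char) : l.map ppEscB = l.map ppEscA :=
  List.map_congr_left (fun c _ => ppEsc_eq c)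

theorem ppJoin_shift (l : List String) (s : String) :
    l.foldl (· ++ ·) s = s ++ ppJoin l := by
  induction l generalizing s with
  | nil => simp [ppJoin]
  | cons a l ih =>
    simp only [ppJoin, List.foldl_cons]
    rw [ih, ih ("" ++ a)]
    simp [String.append_assoc]

theorem ppJoin_cons (a : String) (l : List String) :
    ppJoin (a :: l) = a ++ ppJoin l := by
  simp only [ppJoin, List.foldl_cons]
  rw [ppJoin_shift]
  simp [ppJoin]

-- A's bracket state (ctx = 1): scan to the first ']' (or to the end, dropping the group)
theorem ppLoopA_ctx1 (cs : List Char) (res newRes : List String) (regex chrs : String) :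
    ppLoopA cs res newRes regex 1 chrs =
      (match cs.dropWhile (· ≠ ']') with
       | [] => (regex, res)
       | _ :: rest =>
         ppLoopA rest
           (newRes ++ (cs.takeWhile (· ≠ ']')).flatMap (fun c => res.map (·.push c)))
           (newRes ++ (cs.takeWhile (· ≠ ']')).flatMap (fun c => res.map (·.push c)))
           (regex ++ "[" ++ (chrs ++ ppJoin ((cs.takeWhile (· ≠ ']')).map ppEscA)) ++ "]") 0
           (chrs ++ ppJoin ((cs.takeWhile (· ≠ ']')).map ppEscA))) := by
  induction cs generalizing res newRes regex chrs with
  | nil => simp [ppLoopA]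
  | cons c cs ih =>
    by_cases hc : c = ']'
    · subst hc
      simp [ppLoopA, ppJoin]
    · have hne : (']' : Char) ≠ c := fun h => hc h.symm
      simp only [ppLoopA, show ((1 : Int) == 0) = false from rfl, Bool.false_eq_true, if_false,
        beq_iff_eq, hc, if_false]
      rw [ih]
      simp only [List.dropWhile_cons, List.takeWhile_cons, decide_eq_true_eq]
      rw [if_pos hc, if_pos hc]
      cases hdw : cs.dropWhile (· ≠ ']') with
      | nil => simp
      | cons d rest =>
        simp [List.flatMap_cons, ppJoin_cons, List.append_assoc, String.append_assoc]

-- the main invariant: A's ctx-0 loop = regex so far + B's tokenized tail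
theorem ppLoopA_ctx0 (n : Nat) : ∀ (cs : List Char), cs.length ≤ n →
    ∀ (res newRes : List String) (regex chrs : String),
    ppLoopA cs res newRes regex 0 chrs =
      (regex ++ ppJoin ((ppTokenize cs).map ppTokRegex), (ppTokenize cs).foldl ppTokRes res) := by
  induction n with
  | zero =>
    intro cs hlen res newRes regex chrs
    have : cs = [] := List.length_eq_zero_iff.mp (Nat.le_zero.mp hlen)
    subst this
    simp [ppLoopA, ppTokenize, ppJoin]
  | succ n ih =>
    intro cs hlen res newRes regex chrs
    cases cs with
    | nil => simp [ppLoopA, ppTokenize, ppJoin]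
    | cons c cs =>
      simp only [List.length_cons] at hlen
      by_cases hstar : c = '*'
      · subst hstar
        simp only [ppLoopA, show ((0 : Int) == 0) = true from rfl, if_true, beq_self_eq_true]
        rw [ih cs (by omega)]
        simp [ppTokenize, ppTokRegex, ppTokRes, ppJoin_cons, String.append_assoc]
      · by_cases hbr : c = '['
        · subst hbr
          simp only [ppLoopA, show ((0 : Int) == 0) = true from rfl, if_true, beq_iff_eq,
            show ('[' : Char) ≠ '*' from by decide, if_false, if_true]
          rw [ppLoopA_ctx1]
          simp only [ppTokenize, beq_self_eq_true, if_true]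
          cases hdw : cs.dropWhile (· ≠ ']') with
          | nil => simp [ppJoin]
          | cons d rest =>
            dsimp only
            have hrest : rest.length ≤ n := by
              have h1 : (cs.dropWhile (· ≠ ']')).length ≤ cs.length :=
                cs.length_dropWhile_le _
              rw [hdw] at h1
              simp at h1
              omega
            rw [ih rest hrest]
            simp [ppTokRegex, ppTokRes, ppJoin_cons, String.append_assoc, ppMapEsc_eq]
        · simp only [ppLoopA, show ((0 : Int) == 0) = true from rfl, if_true, beq_iff_eq,
            hstar, if_false, hbr, if_false]
          rw [ih cs (by omega)]
          simp [ppTokenize, hstar, hbr, ppTokRegex, ppTokRes, ppJoin_cons, String.append_assoc,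
            ppEsc_eq]

-- ===== VERDICT (by name: the statement is the Claim_ definition above) =====
theorem path_part_to_re_spec : Claim_equal_path_part_to_re := by
  intro part _
  unfold Spec_path_part_to_re path_part_to_re path_part_to_re_alt
  rw [ppLoopA_ctx0 part.toList.length part.toList le_rfl]
  simp
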